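-- pv_equiv track=rewrite | github.com/jhorn26/robox_forever | auxiliar/poligon.py | find_one_inside
-- ===== SOURCE A (Python) =====
-- def find_one_inside(m, n, walls):
--     for i in range(m):
--         thickness = 0
--         for j in range(n):
--             if (j, i) in walls:
--                 thickness += 1
--             if (j, i) in walls and (j + 1, i) not in walls and thickness == 1:
--                 return (j + 1, i)
-- ===== SOURCE B (Python) =====
-- def find_one_inside(m, n, walls):
--     # group wall coordinates by row: minimal column per in-range row
--     best = {}
--     for w in walls:
--         if len(w) == 2:
--             j, i = w
--             if 0 <= i < m and 0 <= j < n: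
--                 if i not in best or j < best[i]:
--                     best[i] = j
--     # rows in increasing order; first row whose leftmost wall is single
--     for i in sorted(best):
--         j0 = best[i]
--         if (j0 + 1, i) not in walls:
--             return (j0 + 1, i)
--     return None
-- ===== Notes on version B (the rewrite author's own statement) =====
-- stated objective: faster
-- what changed: Instead of scanning every cell of the m x n grid row by row, B makes one pass over the wall set to record the minimal wall column per in-range row, then visits the rows with walls in sorted order and returns right of the first row-minimum whose right neighbour is not a wall.
import Mathlib
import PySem

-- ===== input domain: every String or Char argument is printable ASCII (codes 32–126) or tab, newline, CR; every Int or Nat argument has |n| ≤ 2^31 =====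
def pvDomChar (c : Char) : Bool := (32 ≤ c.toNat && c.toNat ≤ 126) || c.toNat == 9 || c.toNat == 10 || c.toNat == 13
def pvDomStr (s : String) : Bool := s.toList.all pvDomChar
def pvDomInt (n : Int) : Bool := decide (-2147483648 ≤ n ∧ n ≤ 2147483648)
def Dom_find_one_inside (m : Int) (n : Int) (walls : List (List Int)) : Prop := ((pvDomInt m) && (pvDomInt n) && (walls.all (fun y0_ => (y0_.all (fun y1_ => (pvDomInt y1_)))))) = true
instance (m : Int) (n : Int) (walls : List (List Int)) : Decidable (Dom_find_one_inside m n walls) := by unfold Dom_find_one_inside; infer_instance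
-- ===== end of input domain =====

-- B replaces A's full m×n grid scan by one pass over the wall set (min column per row) plus a sorted sweep of the occupied rows: asymptotically faster.


-- ===== PORT A =====
-- inner loop: for j in range(n) with the running thickness counter
def pvA_row (walls : List (List Int)) (i : Int) : List Int → Int → Option (List Int)
  | [], _ => none
  | j :: js, t =>
    let t' := if [j, i] ∈ walls then t + 1 else t
    if [j, i] ∈ walls ∧ [j + 1, i] ∉ walls ∧ t' = 1 then some [j + 1, i]
    else pvA_row walls i js t'

-- outer loop: for i in range(m), returning on the first hit
def pvA_rows (n : Int) (walls : List (List Int)) : List Int → Option (List Int)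
  | [] => none
  | i :: is =>
    match pvA_row walls i (PySem.List.pyRange 0 n 1) 0 with
    | some r => some r
    | none => pvA_rows n walls is

def find_one_inside (m : Int) (n : Int) (walls : List (List Int)) : Option (List Int) :=
  pvA_rows n walls (PySem.List.pyRange 0 m 1)

-- ===== PORT B =====
-- one pass over the wall set: minimal wall column per in-range row
def pvB_step (m n : Int) (d : PySem.Dict Int Int) (w : List Int) : PySem.Dict Int Int :=
  match w with
  | [j, i] =>
    if 0 ≤ i ∧ i < m ∧ 0 ≤ j ∧ j < n then
      match d.get? i with
      | none => d.insert i j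
      | some b => if j < b then d.insert i j else d
    else d
  | _ => d

def pvB_best (m n : Int) (walls : List (List Int)) : PySem.Dict Int Int :=
  walls.foldl (pvB_step m n) PySem.Dict.empty

-- sweep of the occupied rows in increasing order
def pvB_scan (walls : List (List Int)) (best : PySem.Dict Int Int) : List Int → Option (List Int)
  | [] => none
  | i :: is =>
    let j0 := best.getD i 0
    if [j0 + 1, i] ∈ walls then pvB_scan walls best is
    else some [j0 + 1, i]

def find_one_inside_alt (m : Int) (n : Int) (walls : List (List Int)) : Option (List Int) :=
  let best := pvB_best m n walls
  pvB_scan walls best (PySem.List.sorted best.keys (fun x => x) false)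

-- ===== PRECONDITION & SPEC =====
def Spec_find_one_inside (m : Int) (n : Int) (walls : List (List Int)) (out : Option (List Int)) : Prop := out = find_one_inside_alt m n walls
instance (m : Int) (n : Int) (walls : List (List Int)) (out : Option (List Int)) : Decidable (Spec_find_one_inside m n walls out) := by unfold Spec_find_one_inside; infer_instance

-- ===== CLAIM (what is proved, stated in full; the proofs are below) =====
def Claim_equal_find_one_inside : Prop := ∀ (m : Int) (n : Int) (walls : List (List Int)), Dom_find_one_inside m n walls → Spec_find_one_inside m n walls (find_one_inside m n walls)

-- ===== LEMMAS AND PROOFS =====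

-- result of one row of A, expressed through the first in-range wall column
def pvRowRes (n : Int) (walls : List (List Int)) (i : Int) : Option (List Int) :=
  match (PySem.List.pyRange 0 n 1).find? (fun j => decide ([j, i] ∈ walls)) with
  | none => none
  | some j0 => if [j0 + 1, i] ∈ walls then none else some [j0 + 1, i]

-- the wall entry w seen as an in-range wall column of row i
def pvJsF (m n i : Int) (w : List Int) : Option Int :=
  match w with
  | [j, i'] => if i' = i ∧ 0 ≤ i' ∧ i' < m ∧ 0 ≤ j ∧ j < n then some j else none
  | _ => none

-- the in-range wall columns of row i, in the order B's fold meets them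
def pvJs (m n : Int) (i : Int) (ws : List (List Int)) : List Int :=
  ws.filterMap (pvJsF m n i)

-- the running-minimum step B's dict performs on one row
def pvMinStep (acc : Option Int) (j : Int) : Option Int :=
  match acc with
  | none => some j
  | some b => if j < b then some j else some b

theorem pvA_row_pos (walls : List (List Int)) (i : Int) (js : List Int) (t : Int)
    (ht : 1 ≤ t) : pvA_row walls i js t = none := by
  induction js generalizing t with
  | nil => rfl
  | cons j js ih =>
    simp only [pvA_row]
    by_cases hw : [j, i] ∈ walls
    · have h1 : t + 1 ≠ 1 := by omega
      simp only [hw, if_true, h1, and_false, if_false]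
      exact ih (t + 1) (by omega)
    · simp only [hw, if_false, false_and]
      exact ih t ht

theorem pvA_row_zero (walls : List (List Int)) (i : Int) (js : List Int) :
    pvA_row walls i js 0 =
      match js.find? (fun j => decide ([j, i] ∈ walls)) with
      | none => none
      | some j0 => if [j0 + 1, i] ∈ walls then none else some [j0 + 1, i] := by
  induction js with
  | nil => rfl
  | cons j js ih =>
    simp only [pvA_row, List.find?]
    by_cases hw : [j, i] ∈ walls
    · simp only [hw, decide_true, if_true, true_and]
      by_cases hn : [j + 1, i] ∈ walls
      · simp only [hn, not_true, false_and, if_false, if_true]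
        exact pvA_row_pos walls i js (0 + 1) (by omega)
      · simp only [hn, not_false_iff, true_and, if_pos (show (0:Int)+1 = 1 by omega), if_false]
    · simp only [hw, decide_false, false_and, if_false]
      exact ih

theorem pvA_rows_eq_findSome? (n : Int) (walls : List (List Int)) (is : List Int) :
    pvA_rows n walls is = is.findSome? (pvRowRes n walls) := by
  induction is with
  | nil => rfl
  | cons i is ih =>
    simp only [pvA_rows, List.findSome?, pvRowRes, pvA_row_zero]
    cases (PySem.List.pyRange 0 n 1).find? (fun j => decide ([j, i] ∈ walls)) with
    | none => simpa using ih
    | some j0 =>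
      by_cases hn : [j0 + 1, i] ∈ walls
      · simp only [hn, if_true]; simpa using ih
      · simp [hn]

-- effect of one fold step of B on the lookup at row i
theorem pvB_step_get? (m n i : Int) (d : PySem.Dict Int Int) (w : List Int) :
    (pvB_step m n d w).get? i =
      match pvJsF m n i w with
      | some j => pvMinStep (d.get? i) j
      | none => d.get? i := by
  rcases w with _ | ⟨j, _ | ⟨i', _ | ⟨x, rest⟩⟩⟩ <;>
    simp only [pvB_step, pvJsF]
  by_cases hc : 0 ≤ i' ∧ i' < m ∧ 0 ≤ j ∧ j < n
  · rw [if_pos hc]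
    by_cases hi : i' = i
    · subst hi
      rw [if_pos ⟨rfl, hc⟩]
      simp only [pvMinStep]
      cases hd : d.get? i' with
      | none => simp [PySem.Dict.get?_insert_self]
      | some b =>
        by_cases hj : j < b
        · simp [hj, PySem.Dict.get?_insert_self]
        · simp [hj, hd]
    · have : ¬(i' = i ∧ 0 ≤ i' ∧ i' < m ∧ 0 ≤ j ∧ j < n) := fun h => hi h.1
      rw [if_neg this]
      cases d.get? i' with
      | none => simp [PySem.Dict.get?_insert_of_ne _ _ (fun h => hi h.symm)]
      | some b =>
        by_cases hj : j < b
        · simp [hj, PySem.Dict.get?_insert_of_ne _ _ (fun h => hi h.symm)]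
        · simp [hj]
  · rw [if_neg hc]
    have : ¬(i' = i ∧ 0 ≤ i' ∧ i' < m ∧ 0 ≤ j ∧ j < n) := fun h => hc h.2
    rw [if_neg this]

-- B's dict lookup is the running minimum over pvJs
theorem pvB_get?_fold (m n : Int) (i : Int) (ws : List (List Int)) (d : PySem.Dict Int Int) :
    (ws.foldl (pvB_step m n) d).get? i = (pvJs m n i ws).foldl pvMinStep (d.get? i) := by
  induction ws generalizing d with
  | nil => rfl
  | cons w ws ih =>
    simp only [List.foldl_cons, pvJs, List.filterMap_cons]
    rw [ih, pvB_step_get?]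
    cases pvJsF m n i w with
    | none => rfl
    | some j => simp [List.foldl_cons, pvJs]

theorem pvMinStep_some (a j : Int) : pvMinStep (some a) j = some (min a j) := by
  simp only [pvMinStep]
  by_cases hj : j < a
  · rw [if_pos hj, min_eq_right (le_of_lt hj)]
  · rw [if_neg hj, min_eq_left (by omega)]

theorem pvMin_fold_some (l : List Int) (a : Int) :
    l.foldl pvMinStep (some a) = some (l.foldl min a) := by
  induction l generalizing a with
  | nil => rfl
  | cons j l ih => simp only [List.foldl_cons, pvMinStep_some, ih]

theorem pvFoldMin_mem (l : List Int) (a : Int) : l.foldl min a ∈ a :: l := by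
  induction l generalizing a with
  | nil => simp
  | cons j l ih =>
    simp only [List.foldl_cons]
    rcases List.mem_cons.mp (ih (min a j)) with h | h
    · rcases min_choice a j with h' | h' <;> rw [h, h'] <;> simp
    · simp [h]

theorem pvFoldMin_le (l : List Int) (a : Int) : ∀ y ∈ a :: l, l.foldl min a ≤ y := by
  induction l generalizing a with
  | nil => intro y hy; simp at hy; simp [hy]
  | cons j l ih =>
    intro y hy
    simp only [List.foldl_cons]
    rcases List.mem_cons.mp hy with h | h
    · rw [h]
      exact le_trans (ih (min a j) (min a j) (by simp)) (min_le_left a j)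
    · rcases List.mem_cons.mp h with h' | h'
      · rw [h']
        exact le_trans (ih (min a j) (min a j) (by simp)) (min_le_right a j)
      · exact ih (min a j) y (by simp [h'])

theorem pvMin_none (l : List Int) : l.foldl pvMinStep none = none ↔ l = [] := by
  cases l with
  | nil => simp
  | cons j l => simp [List.foldl_cons, pvMinStep, pvMin_fold_some]

theorem pvMin_some (l : List Int) (x : Int) :
    l.foldl pvMinStep none = some x ↔ x ∈ l ∧ ∀ y ∈ l, x ≤ y := by
  cases l with
  | nil => simp
  | cons j l =>
    simp only [List.foldl_cons, pvMinStep, pvMin_fold_some, Option.some_inj]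
    constructor
    · rintro rfl
      exact ⟨pvFoldMin_mem l j, fun y hy => pvFoldMin_le l j y hy⟩
    · rintro ⟨hx, hle⟩
      have h1 : l.foldl min j ≤ x := pvFoldMin_le l j x hx
      have h2 : x ≤ l.foldl min j := hle _ (pvFoldMin_mem l j)
      omega

theorem pvFind?_min (l : List Int) (p : Int → Bool) (hl : l.Pairwise (· < ·)) (x : Int) :
    l.find? p = some x ↔ x ∈ l ∧ p x = true ∧ ∀ y ∈ l, p y = true → x ≤ y := by
  induction l with
  | nil => simp
  | cons a t ih =>
    rcases List.pairwise_cons.mp hl with ⟨ha, ht⟩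
    simp only [List.find?]
    by_cases hp : p a = true
    · simp only [hp, Option.some_inj]
      constructor
      · rintro rfl
        refine ⟨List.mem_cons_self, hp, ?_⟩
        intro y hy _
        rcases List.mem_cons.mp hy with rfl | h
        · exact le_refl _
        · exact le_of_lt (ha y h)
      · rintro ⟨hx, hpx, hmin⟩
        rcases List.mem_cons.mp hx with rfl | h
        · rfl
        · have := hmin a List.mem_cons_self hp
          have := ha x h
          omega
    · simp only [hp]
      rw [ih ht]
      constructor
      · rintro ⟨hx, hpx, hmin⟩
        refine ⟨List.mem_cons_of_mem a hx, hpx, ?_⟩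
        intro y hy hpy
        rcases List.mem_cons.mp hy with rfl | h
        · exact absurd hpy hp
        · exact hmin y h hpy
      · rintro ⟨hx, hpx, hmin⟩
        rcases List.mem_cons.mp hx with rfl | h
        · exact absurd hpx hp
        · exact ⟨h, hpx, fun y hy hpy => hmin y (List.mem_cons_of_mem a hy) hpy⟩

-- membership in pvJs
theorem pvMem_pvJs (m n i : Int) (ws : List (List Int)) (j : Int) :
    j ∈ pvJs m n i ws ↔ [j, i] ∈ ws ∧ 0 ≤ i ∧ i < m ∧ 0 ≤ j ∧ j < n := by
  simp only [pvJs, List.mem_filterMap]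
  constructor
  · rintro ⟨w, hw, hf⟩
    rcases w with _ | ⟨j', _ | ⟨i', _ | ⟨x, rest⟩⟩⟩ <;> simp only [pvJsF] at hf
    · cases hf
    · cases hf
    · split_ifs at hf with hc
      rcases hc with ⟨rfl, hc⟩
      cases hf
      exact ⟨hw, hc.1, hc.2.1, hc.2.2.1, hc.2.2.2⟩
    · cases hf
  · rintro ⟨hw, h1, h2, h3, h4⟩
    exact ⟨[j, i], hw, by simp [pvJsF, h1, h2, h3, h4]⟩

-- characterization of B's dict
theorem pvBest_get? (m n : Int) (walls : List (List Int)) (i : Int) :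
    (pvB_best m n walls).get? i = (pvJs m n i walls).foldl pvMinStep none := by
  have := pvB_get?_fold m n i walls PySem.Dict.empty
  simpa [PySem.Dict.get?_empty] using this

-- the dict lookup agrees with A's find? over the column range (for in-range rows)
theorem pvBest_eq_find? (m n : Int) (walls : List (List Int)) (i : Int)
    (h1 : 0 ≤ i) (h2 : i < m) :
    (pvB_best m n walls).get? i =
      (PySem.List.pyRange 0 n 1).find? (fun j => decide ([j, i] ∈ walls)) := by
  rw [pvBest_get?]
  cases hf : (PySem.List.pyRange 0 n 1).find? (fun j => decide ([j, i] ∈ walls)) with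
  | none =>
    rw [List.find?_eq_none] at hf
    rw [pvMin_none]
    by_contra hne
    rcases List.exists_mem_of_ne_nil _ hne with ⟨j, hj⟩
    rcases (pvMem_pvJs m n i walls j).mp hj with ⟨hw, -, -, h3, h4⟩
    exact absurd (by simpa using hw)
      (hf j ((PySem.List.mem_pyRange_one).mpr ⟨h3, h4⟩))
  | some j0 =>
    rw [pvFind?_min _ _ (PySem.List.pairwise_lt_pyRange_one 0 n) j0] at hf
    rcases hf with ⟨hj0, hp, hmin⟩
    rcases (PySem.List.mem_pyRange_one).mp hj0 with ⟨hj0a, hj0b⟩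
    rw [pvMin_some]
    refine ⟨(pvMem_pvJs m n i walls j0).mpr ⟨by simpa using hp, h1, h2, hj0a, hj0b⟩, ?_⟩
    intro y hy
    rcases (pvMem_pvJs m n i walls y).mp hy with ⟨hw, -, -, h3, h4⟩
    exact hmin y ((PySem.List.mem_pyRange_one).mpr ⟨h3, h4⟩) (by simpa using hw)

-- keys of B's dict stay unique
theorem pvBest_keys_nodup (m n : Int) (walls : List (List Int)) :
    (pvB_best m n walls).keys.Nodup := by
  suffices h : ∀ (ws : List (List Int)) (d : PySem.Dict Int Int), d.keys.Nodup →
      (ws.foldl (pvB_step m n) d).keys.Nodup by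
    exact h walls PySem.Dict.empty (by simp)
  intro ws
  induction ws with
  | nil => intro d hd; exact hd
  | cons w ws ih =>
    intro d hd
    refine ih _ ?_
    rcases w with _ | ⟨j, _ | ⟨i', _ | ⟨x, rest⟩⟩⟩ <;> simp only [pvB_step] <;> try exact hd
    split_ifs with hc
    · cases d.get? i' with
      | none => exact PySem.Dict.nodup_keys_insert _ _ _ hd
      | some b =>
        by_cases hj : j < b
        · simpa [hj] using PySem.Dict.nodup_keys_insert d i' j hd
        · simpa [hj] using hd
    · exact hd

-- every key of B's dict is an in-range row
theorem pvBest_keys_mem (m n : Int) (walls : List (List Int)) (i : Int)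
    (h : i ∈ (pvB_best m n walls).keys) : 0 ≤ i ∧ i < m := by
  have hne : (pvB_best m n walls).get? i ≠ none := by
    simp only [Ne, PySem.Dict.get?_eq_none_iff_not_mem_keys]
    simpa using h
  rw [pvBest_get?, Ne, pvMin_none] at hne
  rcases List.exists_mem_of_ne_nil _ hne with ⟨j, hj⟩
  rcases (pvMem_pvJs m n i walls j).mp hj with ⟨-, h1, h2, -, -⟩
  exact ⟨h1, h2⟩

-- the sorted keys are the in-range rows that have a wall, in increasing order
theorem pvSorted_keys (m n : Int) (walls : List (List Int)) :
    PySem.List.sorted (pvB_best m n walls).keys (fun x => x) false =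
      (PySem.List.pyRange 0 m 1).filter
        (fun i => decide (i ∈ (pvB_best m n walls).keys)) := by
  apply PySem.List.sorted_eq_of_perm_of_pairwise_lt
  · rw [List.perm_ext_iff_of_nodup
      (List.Nodup.filter _ (PySem.List.nodup_pyRange_one 0 m)) (pvBest_keys_nodup m n walls)]
    intro x
    simp only [List.mem_filter, PySem.List.mem_pyRange_one, decide_eq_true_eq]
    constructor
    · rintro ⟨-, h⟩; exact h
    · intro h
      rcases pvBest_keys_mem m n walls x h with ⟨h1, h2⟩
      exact ⟨⟨h1, h2⟩, h⟩
  · exact List.Pairwise.filter _ (PySem.List.pairwise_lt_pyRange_one 0 m)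

-- the sweep over rows known to be keys is findSome? of A's row result
theorem pvScan_eq (m n : Int) (walls : List (List Int)) (ys : List Int)
    (hys : ∀ i ∈ ys, i ∈ (pvB_best m n walls).keys) :
    pvB_scan walls (pvB_best m n walls) ys = ys.findSome? (pvRowRes n walls) := by
  induction ys with
  | nil => rfl
  | cons i ys ih =>
    have hik := hys i List.mem_cons_self
    rcases pvBest_keys_mem m n walls i hik with ⟨h1, h2⟩
    have hne : (pvB_best m n walls).get? i ≠ none := by
      simp only [Ne, PySem.Dict.get?_eq_none_iff_not_mem_keys]; simpa using hik
    rcases Option.ne_none_iff_exists'.mp hne with ⟨j0, hj0⟩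
    have hfind : (PySem.List.pyRange 0 n 1).find? (fun j => decide ([j, i] ∈ walls)) = some j0 := by
      rw [← pvBest_eq_find? m n walls i h1 h2]; exact hj0
    have hgetD : (pvB_best m n walls).getD i 0 = j0 :=
      PySem.Dict.getD_of_get?_eq_some _ 0 hj0
    simp only [pvB_scan, List.findSome?, pvRowRes, hfind, hgetD]
    by_cases hn : [j0 + 1, i] ∈ walls
    · simp only [hn, if_true]
      exact ih (fun x hx => hys x (List.mem_cons_of_mem i hx))
    · simp [hn]

-- rows outside the keys contribute nothing to A
theorem pvRowRes_none (m n : Int) (walls : List (List Int)) (i : Int)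
    (h1 : 0 ≤ i) (h2 : i < m) (hk : i ∉ (pvB_best m n walls).keys) :
    pvRowRes n walls i = none := by
  have : (pvB_best m n walls).get? i = none := by
    rw [PySem.Dict.get?_eq_none_iff_not_mem_keys]; simpa using hk
  rw [pvBest_eq_find? m n walls i h1 h2] at this
  simp only [pvRowRes, this]

-- dropping none-rows from a findSome? sweep
theorem pvFindSome?_filter {α β : Type} (l : List α) (p : α → Bool) (f : α → Option β)
    (h : ∀ x ∈ l, p x = false → f x = none) :
    l.findSome? f = (l.filter p).findSome? f := by
  induction l with
  | nil => rfl
  | cons a t ih =>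
    by_cases hp : p a = true
    · simp only [List.filter_cons, hp, if_true, List.findSome?]
      cases f a with
      | none => exact ih (fun x hx => h x (List.mem_cons_of_mem a hx))
      | some b => rfl
    · have hfa := h a List.mem_cons_self (by simpa using hp)
      simp only [List.filter_cons, hp, List.findSome?, hfa]
      exact ih (fun x hx => h x (List.mem_cons_of_mem a hx))

-- ===== VERDICT (by name: the statement is the Claim_ definition above) =====
theorem find_one_inside_spec : Claim_equal_find_one_inside := by
  intro m n walls _
  unfold Spec_find_one_inside find_one_inside find_one_inside_alt
  show pvA_rows n walls (PySem.List.pyRange 0 m 1) =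
    pvB_scan walls (pvB_best m n walls)
      (PySem.List.sorted (pvB_best m n walls).keys (fun x => x) false)
  rw [pvA_rows_eq_findSome?, pvSorted_keys,
    pvScan_eq m n walls _ (by
      intro i hi
      have := List.mem_filter.mp hi
      simpa using this.2)]
  exact pvFindSome?_filter _ _ _ (fun x hx hpx => by
    rcases (PySem.List.mem_pyRange_one).mp hx with ⟨h1, h2⟩
    exact pvRowRes_none m n walls x h1 h2 (by simpa using hpx))
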